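-- pv_equiv track=rewrite | github.com/Steph7/codigos | PDC/Lista Exercícios 7/problema2.py | compararListas
-- ===== SOURCE A (Python) =====
-- def compararListas(lista):
--     A = set(lista[0])
--     B = set(lista[1])
--     C = set(lista[2])
--     D = set(lista[3])
--
--     intAB = set(A.intersection(B))
--     intCD = set(C.intersection(D))
--     intABCD = intAB.intersection(intCD)
--
--     maior = None
--     for x in intABCD:
--         if maior == None or x > maior:
--             maior = x
--     return maior
-- ===== SOURCE B (Python) =====
-- def compararListas(lista):
--     # Count, per value, in how many of the four lists it occurs (each list
--     # deduplicated first); the four-way intersection is exactly count == 4.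
--     contagem = {}
--     for l in lista[0], lista[1], lista[2], lista[3]:
--         for x in set(l):
--             contagem[x] = contagem.get(x, 0) + 1
--     maior = None
--     for x, c in contagem.items():
--         if c == 4 and (maior is None or x > maior):
--             maior = x
--     return maior
-- ===== Notes on version B (the rewrite author's own statement) =====
-- stated objective: alternative
-- what changed: Replaces the pairwise set-intersection chain by a single occurrence counter over the four deduplicated lists (an element is in the intersection iff its count is 4), with the max taken in one pass over the counter.
import Mathlib
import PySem

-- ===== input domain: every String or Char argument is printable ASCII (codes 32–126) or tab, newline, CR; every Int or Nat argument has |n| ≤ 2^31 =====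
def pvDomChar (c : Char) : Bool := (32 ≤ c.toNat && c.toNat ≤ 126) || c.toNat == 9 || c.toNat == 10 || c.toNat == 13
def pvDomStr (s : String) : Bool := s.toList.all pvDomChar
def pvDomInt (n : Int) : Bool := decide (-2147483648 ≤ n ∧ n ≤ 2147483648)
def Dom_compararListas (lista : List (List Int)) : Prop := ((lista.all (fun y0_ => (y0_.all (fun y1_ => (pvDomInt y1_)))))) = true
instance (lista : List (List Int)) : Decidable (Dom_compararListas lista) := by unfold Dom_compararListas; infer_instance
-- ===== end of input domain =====

-- B replaces A's pairwise set intersections by one occurrence counter over the four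
-- deduplicated lists (count == 4 ⇔ in all four); same cost, different decomposition.

-- ===== PORT A =====
def compararListas (lista : List (List Int)) : Option Int :=
  match PySem.List.pyGet? lista 0, PySem.List.pyGet? lista 1,
        PySem.List.pyGet? lista 2, PySem.List.pyGet? lista 3 with
  | some l0, some l1, some l2, some l3 =>
    let A := PySem.Set.ofList l0
    let B := PySem.Set.ofList l1
    let C := PySem.Set.ofList l2
    let D := PySem.Set.ofList l3
    let intAB := PySem.Set.ofList (PySem.Set.inter A B)
    let intCD := PySem.Set.ofList (PySem.Set.inter C D)
    let intABCD := PySem.Set.inter intAB intCD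
    -- 'for x in intABCD: if maior == None or x > maior: maior = x'
    -- (a max over the set: the result does not depend on the iteration order)
    intABCD.foldl (fun maior x =>
      match maior with
      | none => some x
      | some m => if x > m then some x else some m) none
  | _, _, _, _ => none   -- lista[k] raised IndexError: excluded by Pre_

-- ===== PORT B =====
-- contagem: for each value, in how many of the (deduplicated) lists it occurs
def pvContagem (ls : List (List Int)) : PySem.Dict Int Int :=
  ls.foldl (fun d l => (PySem.Set.ofList l).foldl
    (fun d x => d.insert x (d.getD x 0 + 1)) d) PySem.Dict.empty

def compararListas_alt (lista : List (List Int)) : Option Int :=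
  -- the tuple 'lista[0], lista[1], lista[2], lista[3]' indexes left to right;
  -- a missing index is IndexError (excluded by Pre_), ported as nested Option matches
  match PySem.List.pyGet? lista 0 with
  | none => none
  | some l0 =>
    match PySem.List.pyGet? lista 1 with
    | none => none
    | some l1 =>
      match PySem.List.pyGet? lista 2 with
      | none => none
      | some l2 =>
        match PySem.List.pyGet? lista 3 with
        | none => none
        | some l3 =>
          (pvContagem [l0, l1, l2, l3]).items.foldl (fun maior (p : Int × Int) =>
            if p.2 == 4 then
              match maior with
              | none => some p.1
              | some m => if p.1 > m then some p.1 else some m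
            else maior) none

-- ===== PRECONDITION & SPEC =====
-- Pre_ excludes exactly the inputs on which both Pythons raise IndexError (fewer than four lists).
def Pre_compararListas (lista : List (List Int)) : Prop := 4 ≤ lista.length
instance (lista : List (List Int)) : Decidable (Pre_compararListas lista) := by
  unfold Pre_compararListas; infer_instance
def pvWitness_compararListas : List (List Int) := [[1, 2], [2, 3], [2], [2, 5]]

def Spec_compararListas (lista : List (List Int)) (out : Option Int) : Prop :=
  out = compararListas_alt lista
instance (lista : List (List Int)) (out : Option Int) :
    Decidable (Spec_compararListas lista out) := by unfold Spec_compararListas; infer_instance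

-- ===== CLAIM (what is proved, stated in full; the proofs are below) =====
def Claim_equal_compararListas : Prop :=
  ∀ (lista : List (List Int)), Dom_compararListas lista → Pre_compararListas lista →
    Spec_compararListas lista (compararListas lista)
-- ===== LEMMAS AND PROOFS =====

-- The max-accumulator step shared by both loops
def pvMaxStep (maior : Option Int) (x : Int) : Option Int :=
  match maior with
  | none => some x
  | some m => if x > m then some x else some m

theorem pvMaxStep_some (m x : Int) : pvMaxStep (some m) x = some (max m x) := by
  unfold pvMaxStep
  by_cases h : x > m <;> simp [h, Int.max_def] <;> omega

theorem foldl_pvMaxStep_some (L : List Int) (m : Int) :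
    L.foldl pvMaxStep (some m) = some (L.foldl max m) := by
  induction L generalizing m with
  | nil => rfl
  | cons x xs ih => simp [List.foldl_cons, pvMaxStep_some, ih]

theorem foldl_pvMaxStep_eq_max? (L : List Int) :
    L.foldl pvMaxStep none = L.max? := by
  cases L with
  | nil => rfl
  | cons x xs =>
    rw [List.foldl_cons, List.max?_cons']
    exact foldl_pvMaxStep_some xs x

theorem max?_congr_mem (L1 L2 : List Int) (h : ∀ x, x ∈ L1 ↔ x ∈ L2) :
    L1.max? = L2.max? := by
  cases hm : L1.max? with
  | none =>
    rw [List.max?_eq_none_iff] at hm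
    have : L2 = [] := by
      cases L2 with
      | nil => rfl
      | cons y ys => exact absurd ((h y).mpr (by simp)) (by simp [hm])
    simp [this]
  | some m =>
    rw [List.max?_eq_some_iff] at hm
    symm
    rw [List.max?_eq_some_iff]
    exact ⟨(h m).mp hm.1, fun b hb => hm.2 b ((h b).mpr hb)⟩

-- the nested counting loop over [l0,l1,l2,l3] = one counting loop over the concatenation
theorem foldl_count_flat_aux (ls : List (List Int)) (d : PySem.Dict Int Int) :
    ls.foldl (fun d l => (PySem.Set.ofList l).foldl
        (fun d x => d.insert x (d.getD x 0 + 1)) d) d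
      = (ls.flatMap PySem.Set.ofList).foldl
        (fun d x => d.insert x (d.getD x 0 + 1)) d := by
  induction ls generalizing d with
  | nil => rfl
  | cons l ls ih => simp [List.flatMap_cons, List.foldl_append, ih]

theorem pvContagem_eq_counter (ls : List (List Int)) :
    pvContagem ls = PySem.Dict.counter (ls.flatMap PySem.Set.ofList) := by
  unfold pvContagem
  rw [foldl_count_flat_aux, PySem.Dict.foldl_insert_getD_add_one_eq_counter]

-- B's loop = a pvMaxStep fold over the keys whose count is 4
theorem foldl_cond_step (items : List (Int × Int)) (acc : Option Int) :
    items.foldl (fun maior p =>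
      if p.2 == 4 then
        match maior with
        | none => some p.1
        | some m => if p.1 > m then some p.1 else some m
      else maior) acc
    = ((items.filter (fun p => p.2 == 4)).map Prod.fst).foldl pvMaxStep acc := by
  induction items generalizing acc with
  | nil => rfl
  | cons p ps ih =>
    by_cases h : p.2 = 4
    · have hb : (p.2 == 4) = true := by simp [h]
      simp only [List.foldl_cons, List.filter_cons, hb, if_true, List.map_cons]
      exact ih _
    · have hb : (p.2 == 4) = false := by simp [h]
      simp only [List.foldl_cons, List.filter_cons, hb, Bool.false_eq_true, if_false]
      exact ih _

theorem count_nodup_mem (s : List Int) (hnd : s.Nodup) (x : Int) :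
    s.count x = if x ∈ s then 1 else 0 := by
  by_cases h : x ∈ s
  · simp [h, List.count_eq_one_of_mem hnd h]
  · simp [h, List.count_eq_zero_of_not_mem h]

-- ===== VERDICT (by name: the statement is the Claim_ definition above) =====
theorem compararListas_spec : Claim_equal_compararListas := by
  intro lista _ hpre
  unfold Spec_compararListas
  match lista, hpre with
  | l0 :: l1 :: l2 :: l3 :: rest, _ =>
    have h0 : PySem.List.pyGet? (l0::l1::l2::l3::rest) 0 = some l0 := by
      simp [PySem.List.pyGet?, PySem.List.pyIdx?,
        show (0:Int) ≤ (rest.length:Int)+1+1+1 by omega]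
    have h1 : PySem.List.pyGet? (l0::l1::l2::l3::rest) 1 = some l1 := by
      simp [PySem.List.pyGet?, PySem.List.pyIdx?,
        show (0:Int) ≤ (rest.length:Int)+1+1 by omega]
    have h2 : PySem.List.pyGet? (l0::l1::l2::l3::rest) 2 = some l2 := by
      simp [PySem.List.pyGet?, PySem.List.pyIdx?,
        show (2:Int) ≤ (rest.length:Int)+1+1+1 by omega]
    have h3 : PySem.List.pyGet? (l0::l1::l2::l3::rest) 3 = some l3 := by
      simp [PySem.List.pyGet?, PySem.List.pyIdx?,
        show (3:Int) ≤ (rest.length:Int)+1+1+1 by omega]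
    unfold compararListas compararListas_alt
    rw [h0, h1, h2, h3]
    simp only []
    rw [pvContagem_eq_counter, foldl_cond_step, foldl_pvMaxStep_eq_max?,
        show (fun (maior : Option Int) (x : Int) =>
          match maior with
          | none => some x
          | some m => if x > m then some x else some m) = pvMaxStep from rfl,
        foldl_pvMaxStep_eq_max?]
    apply max?_congr_mem
    intro x
    set pool := ([l0, l1, l2, l3] : List (List Int)).flatMap PySem.Set.ofList with hpool
    have hcnt : pool.count x =
        (if x ∈ l0 then 1 else 0) + ((if x ∈ l1 then 1 else 0)
        + ((if x ∈ l2 then 1 else 0) + (if x ∈ l3 then 1 else 0))) := by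
      simp only [hpool, List.flatMap_cons, List.flatMap_nil, List.append_nil,
        List.count_append, count_nodup_mem _ (PySem.Set.nodup_ofList _) x,
        PySem.Set.mem_ofList]
    have hmemp : x ∈ pool ↔ (x ∈ l0 ∨ x ∈ l1 ∨ x ∈ l2 ∨ x ∈ l3) := by
      simp [hpool, PySem.Set.mem_ofList]
    rw [PySem.Dict.items_counter]
    simp only [List.mem_map, List.mem_filter, PySem.Set.mem_inter, PySem.Set.mem_ofList,
      beq_iff_eq]
    constructor
    · rintro ⟨⟨m0, m1⟩, m2, m3⟩
      have hc4 : pool.count x = 4 := by rw [hcnt]; simp [m0, m1, m2, m3]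
      refine ⟨(x, (pool.count x : Int)), ⟨⟨x, hmemp.mpr (Or.inl m0), rfl⟩, ?_⟩, rfl⟩
      show ((pool.count x : Nat) : Int) = 4
      exact_mod_cast hc4
    · rintro ⟨a, ⟨⟨k, hk, rfl⟩, h4⟩, rfl⟩
      have h4' : ((pool.count k : Nat) : Int) = 4 := h4
      have hc : pool.count k = 4 := by exact_mod_cast h4' 
      rw [hcnt] at hc
      refine ⟨⟨?_, ?_⟩, ?_, ?_⟩ <;>
        (by_cases e0 : k ∈ l0 <;> by_cases e1 : k ∈ l1 <;>
          by_cases e2 : k ∈ l2 <;> by_cases e3 : k ∈ l3 <;>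
          simp [e0, e1, e2, e3] at hc ⊢)
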